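-- pv_equiv track=rewrite | github.com/edder773/Algorithm | Python/BOJ/19236 청소년상어.py | each
-- ===== SOURCE A (Python) =====
-- def decomposite(n):
--     if n == 1:
--         return [2, '나', 2]
--     if n < 10:
--         return [n]
--     for i in range(9, 1, -1):
--         if n % i == 0:
--             return decomposite(n // i) + ['따', i]
--     cand = -1
--     maxdiv = -1
--     for i in range(2, 10):
--         for j in range(2, 10):
--             if (n - i) % j == 0 and j > maxdiv:
--                 maxdiv = j
--                 cand = i
--                 break
--     return decomposite(n - cand) + ['다', cand]
--
-- def each(n):
--     name = ['', '', '박', '받', '밤', '발', '밦', '밝', '밣', '밞']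
--     arr = decomposite(n)
--     string = ''
--     for i in range(len(arr) - 1, -1, -2):
--         string += name[arr[i]]
--     for i in range(1, len(arr), 2):
--         string += arr[i]
--     string += '맣'
--     return string
-- ===== SOURCE B (Python) =====
-- def each(n):
--     name = ['', '', '박', '받', '밤', '발', '밦', '밝', '밣', '밞']
--     vals = []
--     marks = []
--     while n >= 10:
--         divs = [i for i in range(2, 10) if n % i == 0]
--         if divs:
--             f = divs[-1]
--             vals.append(f)
--             marks.append('따')
--             n //= f
--         else:
--             cand = -1
--             maxdiv = -1
--             for i in range(2, 10):
--                 bigger = [j for j in range(2, 10) if (n - i) % j == 0 and j > maxdiv]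
--                 if bigger:
--                     maxdiv = bigger[0]
--                     cand = i
--             vals.append(cand)
--             marks.append('다')
--             n -= cand
--     if n == 1:
--         vals += [2, 2]
--         marks.append('나')
--     else:
--         vals.append(n)
--     return ''.join(name[v] for v in vals) + ''.join(reversed(marks)) + '맣'
-- ===== Notes on version B (the rewrite author's own statement) =====
-- stated objective: alternative
-- what changed: Replaces the recursive decomposite that builds a mixed value/marker list (read back by two index-stepping loops) with an iterative peel loop whose factor is the last of a divisor comprehension (instead of a descending break scan) and whose candidate step filters the qualifying j's into a list and takes its head (instead of an inner loop with break), assembled by string joins.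
-- outside the precondition, e.g. on each(-11): A raises IndexError, B raises IndexError
import Mathlib
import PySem

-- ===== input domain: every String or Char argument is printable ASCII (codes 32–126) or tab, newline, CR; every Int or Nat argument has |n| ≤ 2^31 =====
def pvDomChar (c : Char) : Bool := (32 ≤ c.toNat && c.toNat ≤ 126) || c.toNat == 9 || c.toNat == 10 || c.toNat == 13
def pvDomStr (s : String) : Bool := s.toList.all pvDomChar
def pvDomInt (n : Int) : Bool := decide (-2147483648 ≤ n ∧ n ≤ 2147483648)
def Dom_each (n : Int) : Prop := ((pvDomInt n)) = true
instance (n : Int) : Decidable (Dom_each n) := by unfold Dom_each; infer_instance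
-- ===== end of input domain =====

-- B restructures A: instead of a recursive 'decomposite' building one mixed value/marker list that two
-- index-stepping loops read back, B peels n iteratively, selecting the factor as the last element of a
-- divisor comprehension and the candidate via a filtered list's head, and assembles the output with joins.

-- ===== PORT A =====

-- name table (identical literal in both Pythons)
def pvName : List String := ["", "", "박", "받", "밤", "발", "밦", "밝", "밣", "밞"]

-- 'for i in range(9, 1, -1): if n % i == 0: return … i' — first divisor found, none if the loop falls through
def pvFactorA (n : Int) : List Int → Option Int
  | [] => none
  | i :: is => if PySem.Int.mod n i = 0 then some i else pvFactorA n is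

-- inner 'for j' loop with its break: fires on the first j with (n-i) % j == 0 and j > maxdiv, setting (cand, maxdiv) := (i, j)
def pvInnerA (n i : Int) : List Int → Int × Int → Int × Int
  | [], st => st
  | j :: js, st =>
    if PySem.Int.mod (n - i) j = 0 ∧ j > st.2 then (i, j) else pvInnerA n i js st

-- the double loop computing (cand, maxdiv), started at (-1, -1)
def pvCandA (n : Int) : Int × Int :=
  (PySem.List.pyRange 2 10 1).foldl (fun st i => pvInnerA n i (PySem.List.pyRange 2 10 1) st) (-1, -1)

-- lemmas cited by the ports' decreasing_by (termination of the recursion on n)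
lemma pvFactorA_some (n : Int) : ∀ (l : List Int) (i : Int), pvFactorA n l = some i → i ∈ l ∧ PySem.Int.mod n i = 0 := by
  intro l
  induction l with
  | nil => intro i h; simp [pvFactorA] at h
  | cons a as ih =>
    intro i h
    by_cases hd : PySem.Int.mod n a = 0
    · simp [pvFactorA, hd] at h; subst h; exact ⟨List.mem_cons_self, hd⟩
    · simp [pvFactorA, hd] at h
      obtain ⟨h1, h2⟩ := ih i h
      exact ⟨List.mem_cons_of_mem _ h1, h2⟩

lemma pvFactorA_none (n : Int) : ∀ (l : List Int), pvFactorA n l = none → ∀ i ∈ l, PySem.Int.mod n i ≠ 0 := by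
  intro l
  induction l with
  | nil => intro _ i h; simp at h
  | cons a as ih =>
    intro h i hi
    by_cases hd : PySem.Int.mod n a = 0
    · simp [pvFactorA, hd] at h
    · simp [pvFactorA, hd] at h
      rcases List.mem_cons.mp hi with rfl | hm
      · exact hd
      · exact ih h i hm

lemma pvFactorA_bounds (n i : Int) (h : pvFactorA n (PySem.List.pyRange 9 1 (-1)) = some i) :
    1 < i ∧ i ≤ 9 := by
  have := (pvFactorA_some n _ i h).1
  exact (PySem.List.mem_pyRange_neg_one).mp this

lemma pvFloordiv_lt (n i : Int) (hn : 10 ≤ n) (hi : 1 < i) : PySem.Int.floordiv n i < n := by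
  rw [PySem.Int.floordiv_lt_iff_lt_mul (by omega)]
  nlinarith

lemma pvCandA_bound (n : Int) (hodd : PySem.Int.mod n 2 = 1) :
    2 ≤ (pvCandA n).1 ∧ (pvCandA n).1 ≤ 9 := by
  have hR : PySem.List.pyRange 2 10 1 = [2,3,4,5,6,7,8,9] := by decide
  -- Good states
  have hcases : ∀ (i : Int) (l : List Int) (st : Int × Int),
      pvInnerA n i l st = st ∨ ∃ j ∈ l, pvInnerA n i l st = (i, j) := by
    intro i l
    induction l with
    | nil => intro st; left; rfl
    | cons a as ih =>
      intro st
      by_cases hc : PySem.Int.mod (n - i) a = 0 ∧ a > st.2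
      · right; exact ⟨a, by simp, by simp [pvInnerA, hc]⟩
      · rcases ih st with h | ⟨j, hj, hje⟩
        · left; simp [pvInnerA, hc, h]
        · right; exact ⟨j, by simp [hj], by simp [pvInnerA, hc, hje]⟩
  have hgood : ∀ (i : Int) (st : Int × Int), 2 ≤ i → i ≤ 9 →
      (2 ≤ st.1 ∧ st.1 ≤ 9 ∧ 2 ≤ st.2 ∧ st.2 ≤ 9) →
      let st' := pvInnerA n i [2,3,4,5,6,7,8,9] st
      2 ≤ st'.1 ∧ st'.1 ≤ 9 ∧ 2 ≤ st'.2 ∧ st'.2 ≤ 9 := by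
    intro i st h2 h9 hst
    rcases hcases i [2,3,4,5,6,7,8,9] st with h | ⟨j, hj, hje⟩
    · simp only [h]; exact hst
    · simp only [hje]
      fin_cases hj <;> simp <;> omega
  have hfire : ∀ (st : Int × Int), st = (-1, -1) →
      pvInnerA n 3 [2,3,4,5,6,7,8,9] st = (3, 2) := by
    intro st hst
    subst hst
    have hm : PySem.Int.mod (n - 3) 2 = 0 := by
      rw [PySem.Int.mod_eq_emod_of_pos (by norm_num)] at hodd ⊢
      omega
    rw [pvInnerA]
    rw [if_pos ⟨hm, by norm_num⟩]
  have hstep2 : ∀ (st : Int × Int), st = (-1,-1) ∨ (2 ≤ st.1 ∧ st.1 ≤ 9 ∧ 2 ≤ st.2 ∧ st.2 ≤ 9) →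
      let st' := pvInnerA n 2 [2,3,4,5,6,7,8,9] st
      st' = (-1,-1) ∨ (2 ≤ st'.1 ∧ st'.1 ≤ 9 ∧ 2 ≤ st'.2 ∧ st'.2 ≤ 9) := by
    intro st hst
    rcases hcases 2 [2,3,4,5,6,7,8,9] st with h | ⟨j, hj, hje⟩
    · simp only [h]; exact hst
    · right; simp only [hje]; fin_cases hj <;> simp <;> omega
  -- now run the fold
  unfold pvCandA
  rw [hR]
  simp only [List.foldl]
  set s2 := pvInnerA n 2 [2,3,4,5,6,7,8,9] (-1,-1) with hs2
  have h2' : s2 = (-1,-1) ∨ (2 ≤ s2.1 ∧ s2.1 ≤ 9 ∧ 2 ≤ s2.2 ∧ s2.2 ≤ 9) :=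
    hstep2 (-1,-1) (Or.inl rfl)
  set s3 := pvInnerA n 3 [2,3,4,5,6,7,8,9] s2 with hs3
  have h3' : 2 ≤ s3.1 ∧ s3.1 ≤ 9 ∧ 2 ≤ s3.2 ∧ s3.2 ≤ 9 := by
    rcases h2' with h | h
    · rw [hs3, hfire s2 h]; norm_num
    · exact hgood 3 s2 (by norm_num) (by norm_num) h
  have h4 := hgood 4 s3 (by norm_num) (by norm_num) h3'
  have h5 := hgood 5 _ (by norm_num) (by norm_num) h4
  have h6 := hgood 6 _ (by norm_num) (by norm_num) h5
  have h7 := hgood 7 _ (by norm_num) (by norm_num) h6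
  have h8 := hgood 8 _ (by norm_num) (by norm_num) h7
  have h9 := hgood 9 _ (by norm_num) (by norm_num) h8
  exact ⟨h9.1, h9.2.1⟩


def decompositeA (n : Int) : List (Int ⊕ String) :=
  if n = 1 then [Sum.inl 2, Sum.inr "나", Sum.inl 2]
  else if n < 10 then [Sum.inl n]
  else
    match h : pvFactorA n (PySem.List.pyRange 9 1 (-1)) with
    | some i => decompositeA (PySem.Int.floordiv n i) ++ [Sum.inr "따", Sum.inl i]
    | none => decompositeA (n - (pvCandA n).1) ++ [Sum.inr "다", Sum.inl (pvCandA n).1]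
termination_by n.toNat
decreasing_by
  · have hb := pvFactorA_bounds n i h
    have := pvFloordiv_lt n i (by omega) hb.1
    omega
  · have h2 := pvFactorA_none n _ h 2 (by decide)
    rcases PySem.Int.mod_two_eq n with h0 | h1
    · exact absurd h0 h2
    · have := pvCandA_bound n h1
      omega

-- name[arr[i]] in the first loop: even positions hold ints; the getD "" totalizes the
-- IndexError Python raises for n ≤ -11 (excluded by Pre_each); Sum.inr is unreachable there
def pvMemName (x : Int ⊕ String) : String :=
  match x with
  | Sum.inl v => PySem.List.pyGetD pvName v ""
  | Sum.inr _ => ""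

-- arr[i] in the second loop: odd positions hold the marker strings
def pvMemStr (x : Int ⊕ String) : String :=
  match x with
  | Sum.inl _ => ""
  | Sum.inr m => m

def each (n : Int) : String :=
  let arr := decompositeA n
  let s1 := (PySem.List.pyRange ((arr.length : Int) - 1) (-1) (-2)).foldl
      (fun s i => s ++ pvMemName ((PySem.List.pyGet? arr i).getD (Sum.inl 0))) ""
  let s2 := (PySem.List.pyRange 1 (arr.length : Int) 2).foldl
      (fun s i => s ++ pvMemStr ((PySem.List.pyGet? arr i).getD (Sum.inl 0))) s1
  s2 ++ "맣"

-- ===== PORT B =====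

-- divs = [i for i in range(2, 10) if n % i == 0]
def pvDivsB (n : Int) : List Int :=
  (PySem.List.pyRange 2 10 1).filter (fun i => decide (PySem.Int.mod n i = 0))

-- bigger = [j for j in range(2, 10) if (n - i) % j == 0 and j > maxdiv]
def pvBiggerB (n i maxdiv : Int) : List Int :=
  (PySem.List.pyRange 2 10 1).filter (fun j => decide (PySem.Int.mod (n - i) j = 0 ∧ j > maxdiv))

-- the candidate loop: cand/maxdiv updated from the head of the filtered list
def pvCandB (n : Int) : Int × Int :=
  (PySem.List.pyRange 2 10 1).foldl
    (fun st i =>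
      match pvBiggerB n i st.2 with
      | [] => st
      | j :: _ => (i, j)) (-1, -1)

lemma pvInnerA_eq_bigger (n i : Int) : ∀ (l : List Int) (st : Int × Int),
    pvInnerA n i l st =
      (match l.filter (fun j => decide (PySem.Int.mod (n - i) j = 0 ∧ j > st.2)) with
       | [] => st
       | j :: _ => (i, j)) := by
  intro l
  induction l with
  | nil => intro st; rfl
  | cons a as ih =>
    intro st
    by_cases hc : PySem.Int.mod (n - i) a = 0 ∧ a > st.2
    · rw [List.filter_cons_of_pos (by simpa using hc)]
      simp [pvInnerA, hc]
    · rw [List.filter_cons_of_neg (by simpa using hc)]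
      simp only [pvInnerA, if_neg hc]
      exact ih st

lemma pvCandB_eq (n : Int) : pvCandB n = pvCandA n := by
  unfold pvCandB pvCandA
  congr 1
  funext st i
  rw [pvInnerA_eq_bigger n i (PySem.List.pyRange 2 10 1) st]
  rfl

lemma pvDivsB_mem (n f : Int) (h : f ∈ pvDivsB n) : 1 < f ∧ f ≤ 9 ∧ PySem.Int.mod n f = 0 := by
  unfold pvDivsB at h
  rw [List.mem_filter] at h
  obtain ⟨hm, hd⟩ := h
  have := (PySem.List.mem_pyRange_one).mp hm
  exact ⟨by omega, by omega, by simpa using hd⟩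

-- the while loop: peel one factor / candidate off n per iteration, collecting values and markers
def pvPeelB (n : Int) (vals : List Int) (marks : List String) : List Int × List String × Int :=
  if 10 ≤ n then
    if hne : pvDivsB n = [] then
      pvPeelB (n - (pvCandB n).1) (vals ++ [(pvCandB n).1]) (marks ++ ["다"])
    else
      pvPeelB (PySem.Int.floordiv n ((PySem.List.pyGet? (pvDivsB n) (-1)).getD 0))
        (vals ++ [(PySem.List.pyGet? (pvDivsB n) (-1)).getD 0]) (marks ++ ["따"])
  else (vals, marks, n)
termination_by n.toNat
decreasing_by
  · have h2 : PySem.Int.mod n 2 ≠ 0 := by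
      intro hm
      have : (2 : Int) ∈ pvDivsB n := by
        unfold pvDivsB
        rw [List.mem_filter]
        exact ⟨by rw [PySem.List.mem_pyRange_one]; omega, by simpa using hm⟩
      rw [hne] at this
      simp at this
    rcases PySem.Int.mod_two_eq n with h0 | h1
    · exact absurd h0 h2
    · have := pvCandA_bound n h1
      rw [pvCandB_eq]
      omega
  · cases hgl : (pvDivsB n).getLast? with
    | none => exact absurd (List.getLast?_eq_none_iff.mp hgl) hne
    | some f =>
      have hmem : f ∈ pvDivsB n := List.mem_of_getLast? hgl
      obtain ⟨hf1, hf9, -⟩ := pvDivsB_mem n f hmem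
      rw [PySem.List.pyGet?_neg_one, hgl]
      simp only [Option.getD_some]
      have := pvFloordiv_lt n f (by omega) hf1
      omega

def each_alt (n : Int) : String :=
  let r := pvPeelB n [] []
  let vals := if r.2.2 = 1 then r.1 ++ [2, 2] else r.1 ++ [r.2.2]
  let marks := if r.2.2 = 1 then r.2.1 ++ ["나"] else r.2.1
  PySem.Str.join "" (vals.map (fun v => PySem.List.pyGetD pvName v "")) ++
    PySem.Str.join "" marks.reverse ++ "맣"

-- ===== PRECONDITION & SPEC =====
-- Pre_each excludes exactly the inputs n ≤ -11 on which Python A raises IndexError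
-- (name[n] with n below -len(name)); Python B raises there too.
def Pre_each (n : Int) : Prop := -10 ≤ n
instance (n : Int) : Decidable (Pre_each n) := by unfold Pre_each; infer_instance
def pvWitness_each : Int := (187)
def Spec_each (n : Int) (out : String) : Prop := out = each_alt n
instance (n : Int) (out : String) : Decidable (Spec_each n out) := by unfold Spec_each; infer_instance

-- ===== CLAIM (what is proved, stated in full; the proofs are below) =====
def Claim_equal_each : Prop := ∀ (n : Int), Dom_each n → Pre_each n → Spec_each n (each n)

-- ===== LEMMAS AND PROOFS =====

-- bridges: the two selection rules pick the same numbers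
lemma pvFactorA_append (n : Int) : ∀ (xs ys : List Int),
    pvFactorA n (xs ++ ys) = (pvFactorA n xs).or (pvFactorA n ys) := by
  intro xs ys
  induction xs with
  | nil => simp [pvFactorA]
  | cons a as ih =>
    by_cases hd : PySem.Int.mod n a = 0
    · simp [pvFactorA, hd]
    · simp [pvFactorA, hd, ih]

lemma pvFactorA_reverse (n : Int) : ∀ (l : List Int),
    pvFactorA n l.reverse = (l.filter (fun i => decide (PySem.Int.mod n i = 0))).getLast? := by
  intro l
  induction l with
  | nil => rfl
  | cons a as ih =>
    rw [List.reverse_cons, pvFactorA_append, ih]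
    by_cases hp : PySem.Int.mod n a = 0
    · rw [List.filter_cons_of_pos (by simpa using hp)]
      cases hfa : as.filter (fun i => decide (PySem.Int.mod n i = 0)) with
      | nil => simp [pvFactorA, hp]
      | cons b bs =>
        cases hgl : (b :: bs).getLast? with
        | none => exact absurd (List.getLast?_eq_none_iff.mp hgl) (by simp)
        | some c => simp [hgl, List.getLast?_cons_cons]
    · rw [List.filter_cons_of_neg (by simpa using hp)]
      simp [pvFactorA, hp]

lemma pvFactorA_eq_divsB (n : Int) :
    pvFactorA n (PySem.List.pyRange 9 1 (-1)) = (pvDivsB n).getLast? := by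
  have h1 : PySem.List.pyRange 9 1 (-1) = ([2,3,4,5,6,7,8,9] : List Int).reverse := by decide
  have h2 : PySem.List.pyRange 2 10 1 = ([2,3,4,5,6,7,8,9] : List Int) := by decide
  rw [h1, pvFactorA_reverse]
  unfold pvDivsB
  rw [h2]


-- the base list of the recursion, and the appended marker/value pairs (innermost pair first)
def baseArr (f : Int) : List (Int ⊕ String) :=
  if f = 1 then [Sum.inl 2, Sum.inr "나", Sum.inl 2] else [Sum.inl f]

def pairsArr : List Int → List String → List (Int ⊕ String)
  | v :: vs, m :: ms => pairsArr vs ms ++ [Sum.inr m, Sum.inl v]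
  | _, _ => []

-- equation lemmas for the two recursions
lemma decompositeA_base (n : Int) (h : n < 10) : decompositeA n = baseArr n := by
  rw [decompositeA, baseArr]
  by_cases h1 : n = 1 <;> simp [h1, h]

lemma decompositeA_factor (n i : Int) (h1 : ¬ n = 1) (h2 : ¬ n < 10)
    (hfac : pvFactorA n (PySem.List.pyRange 9 1 (-1)) = some i) :
    decompositeA n = decompositeA (PySem.Int.floordiv n i) ++ [Sum.inr "따", Sum.inl i] := by
  rw [decompositeA]
  simp only [if_neg h1, if_neg h2]
  split
  next j hj => rw [hfac] at hj; cases hj; rfl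
  next hj => rw [hfac] at hj; cases hj

lemma decompositeA_cand (n : Int) (h1 : ¬ n = 1) (h2 : ¬ n < 10)
    (hfac : pvFactorA n (PySem.List.pyRange 9 1 (-1)) = none) :
    decompositeA n = decompositeA (n - (pvCandA n).1) ++ [Sum.inr "다", Sum.inl (pvCandA n).1] := by
  rw [decompositeA]
  simp only [if_neg h1, if_neg h2]
  split
  next j hj => rw [hfac] at hj; cases hj
  next hj => rfl

lemma pvPeelB_stop (n : Int) (vals : List Int) (marks : List String) (h : ¬ 10 ≤ n) :
    pvPeelB n vals marks = (vals, marks, n) := by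
  rw [pvPeelB]; simp [h]

lemma pvPeelB_factor (n i : Int) (vals : List Int) (marks : List String) (h : 10 ≤ n)
    (hfac : pvFactorA n (PySem.List.pyRange 9 1 (-1)) = some i) :
    pvPeelB n vals marks = pvPeelB (PySem.Int.floordiv n i) (vals ++ [i]) (marks ++ ["따"]) := by
  have hgl : (pvDivsB n).getLast? = some i := by rw [← pvFactorA_eq_divsB]; exact hfac
  have hne : ¬ pvDivsB n = [] := by
    intro h0; rw [h0] at hgl; simp at hgl
  rw [pvPeelB, if_pos h, dif_neg hne, PySem.List.pyGet?_neg_one, hgl]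
  rfl

lemma pvPeelB_cand (n : Int) (vals : List Int) (marks : List String) (h : 10 ≤ n)
    (hfac : pvFactorA n (PySem.List.pyRange 9 1 (-1)) = none) :
    pvPeelB n vals marks =
      pvPeelB (n - (pvCandA n).1) (vals ++ [(pvCandA n).1]) (marks ++ ["다"]) := by
  have hgl : (pvDivsB n).getLast? = none := by rw [← pvFactorA_eq_divsB]; exact hfac
  have hne : pvDivsB n = [] := List.getLast?_eq_none_iff.mp hgl
  rw [pvPeelB, if_pos h, dif_pos hne, pvCandB_eq]

-- the peel loop computes exactly decompositeA's base and pair lists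
lemma peel_spec : ∀ (k : Nat) (n : Int), n.toNat ≤ k →
    ∃ vs ms f, (∀ vals marks, pvPeelB n vals marks = (vals ++ vs, marks ++ ms, f)) ∧
      vs.length = ms.length ∧
      decompositeA n = baseArr f ++ pairsArr vs ms := by
  intro k
  induction k with
  | zero =>
    intro n hn
    have h10 : ¬ 10 ≤ n := by omega
    refine ⟨[], [], n, ?_, rfl, ?_⟩
    · intro vals marks; rw [pvPeelB_stop n vals marks h10]; simp
    · rw [decompositeA_base n (by omega)]; simp [pairsArr]
  | succ k ih =>
    intro n hn
    by_cases h10 : 10 ≤ n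
    · cases hfac : pvFactorA n (PySem.List.pyRange 9 1 (-1)) with
      | some i =>
        have hb := pvFactorA_bounds n i hfac
        have hlt := pvFloordiv_lt n i h10 hb.1
        obtain ⟨vs, ms, f, hpeel, hlen, hdec⟩ := ih (PySem.Int.floordiv n i) (by omega)
        refine ⟨i :: vs, "따" :: ms, f, ?_, by simp [hlen], ?_⟩
        · intro vals marks
          rw [pvPeelB_factor n i vals marks h10 hfac, hpeel]
          simp
        · rw [decompositeA_factor n i (by omega) (by omega) hfac, hdec]
          simp [pairsArr]
      | none =>
        have h2 := pvFactorA_none n _ hfac 2 (by decide)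
        have hodd : PySem.Int.mod n 2 = 1 := by
          rcases PySem.Int.mod_two_eq n with h0 | h1
          · exact absurd h0 h2
          · exact h1
        have hc := pvCandA_bound n hodd
        obtain ⟨vs, ms, f, hpeel, hlen, hdec⟩ := ih (n - (pvCandA n).1) (by omega)
        refine ⟨(pvCandA n).1 :: vs, "다" :: ms, f, ?_, by simp [hlen], ?_⟩
        · intro vals marks
          rw [pvPeelB_cand n vals marks h10 hfac, hpeel]
          simp
        · rw [decompositeA_cand n (by omega) (by omega) hfac, hdec]
          simp [pairsArr]
    · refine ⟨[], [], n, ?_, rfl, ?_⟩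
      · intro vals marks; rw [pvPeelB_stop n vals marks h10]; simp
      · rw [decompositeA_base n (by omega)]; simp [pairsArr]


-- ===== string side =====

lemma foldl_str_toList {α : Type} (g : α → String) :
    ∀ (l : List α) (s0 : String),
      (l.foldl (fun s i => s ++ g i) s0).toList
        = s0.toList ++ (l.map (fun i => (g i).toList)).flatten := by
  intro l
  induction l with
  | nil => intro s0; simp
  | cons a as ih => intro s0; simp [ih, String.toList_append]

lemma intercalate_nil_flatten : ∀ (l : List (List Char)), List.intercalate [] l = l.flatten := by
  intro l
  induction l with
  | nil => simp [List.intercalate]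
  | cons a as ih =>
    cases as with
    | nil => simp [List.intercalate]
    | cons b bs =>
      have step : List.intercalate ([] : List Char) (a :: b :: bs)
          = a ++ List.intercalate [] (b :: bs) := by simp [List.intercalate]
      rw [step, ih]
      simp

lemma join_empty_toList : ∀ (l : List String),
    (PySem.Str.join "" l).toList = (l.map String.toList).flatten := by
  intro l
  rw [PySem.Str.toList_join]
  show PySem.Chars.join "".toList _ = _
  have : "".toList = ([] : List Char) := rfl
  rw [this]
  unfold PySem.Chars.join
  exact intercalate_nil_flatten _

-- membership bounds for the two stepped ranges
lemma mem_pyRange_m2 (a x : Int) (hx : x ∈ PySem.List.pyRange a (-1) (-2)) : 0 ≤ x ∧ x ≤ a := by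
  unfold PySem.List.pyRange at hx
  norm_num at hx
  obtain ⟨k, hk, rfl⟩ := hx
  split at hk
  · constructor <;> omega
  · omega

lemma pyRange_m2_cons (a : Int) (h : (-1 : Int) < a) :
    PySem.List.pyRange a (-1) (-2) = a :: PySem.List.pyRange (a - 2) (-1) (-2) := by
  unfold PySem.List.pyRange
  norm_num
  rw [if_pos h]
  by_cases h2 : (2 : Int) < 1 + a
  · rw [if_pos h2]
    have hc : ((a + 1 + 2 - 1) / 2).toNat = ((a - 2 + 1 + 2 - 1) / 2).toNat + 1 := by omega
    rw [hc, List.range_succ_eq_map, List.map_cons, List.map_map]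
    congr 1
    · push_cast; ring
    · apply List.map_congr_left
      intro k _
      simp only [Function.comp_apply]
      push_cast; ring
  · rw [if_neg h2]
    have hc : ((a + 1 + 2 - 1) / 2).toNat = 1 := by omega
    rw [hc]
    simp

lemma pyRange_2_snoc (b : Int) (hb : 1 ≤ b) (hodd : b % 2 = 1) :
    PySem.List.pyRange 1 (b + 2) 2 = PySem.List.pyRange 1 b 2 ++ [b] := by
  unfold PySem.List.pyRange
  norm_num
  rw [if_pos (by omega : (1:Int) < b + 2)]
  by_cases h1 : (1:Int) < b
  · rw [if_pos h1]
    have hc : ((b + 2 - 1 + 2 - 1) / 2).toNat = ((b - 1 + 2 - 1) / 2).toNat + 1 := by omega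
    rw [hc, List.range_succ, List.map_append]
    congr 1
    simp only [List.map_cons, List.map_nil]
    congr 1
    have : (((b - 1 + 2 - 1) / 2).toNat : Int) = (b - 1) / 2 := by omega
    rw [this]
    omega
  · rw [if_neg h1]
    have hb1 : b = 1 := by omega
    subst hb1
    norm_num

-- A's first loop over baseArr f ++ pairsArr vs ms: names of the pair values (outermost first), then the base
def loop1 (arr : List (Int ⊕ String)) : String :=
  (PySem.List.pyRange ((arr.length : Int) - 1) (-1) (-2)).foldl
    (fun s i => s ++ pvMemName ((PySem.List.pyGet? arr i).getD (Sum.inl 0))) ""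

def loop2 (arr : List (Int ⊕ String)) (init : String) : String :=
  (PySem.List.pyRange 1 (arr.length : Int) 2).foldl
    (fun s i => s ++ pvMemStr ((PySem.List.pyGet? arr i).getD (Sum.inl 0))) init

lemma each_eq_loops (n : Int) :
    each n = loop2 (decompositeA n) (loop1 (decompositeA n)) ++ "맣" := rfl

lemma loop1_pairs : ∀ (vs : List Int) (ms : List String) (arr : List (Int ⊕ String)),
    vs.length = ms.length →
    (loop1 (arr ++ pairsArr vs ms)).toList
      = (vs.map (fun v => (PySem.List.pyGetD pvName v "").toList)).flatten ++ (loop1 arr).toList := by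
  intro vs
  induction vs with
  | nil => intro ms arr _; simp [pairsArr]
  | cons v vs ih =>
    intro ms arr hlen
    cases ms with
    | nil => simp at hlen
    | cons m ms =>
      have hlen' : vs.length = ms.length := by simpa using hlen
      have hsplit : arr ++ pairsArr (v :: vs) (m :: ms)
          = (arr ++ pairsArr vs ms) ++ [Sum.inr m, Sum.inl v] := by
        simp [pairsArr]
      set A := arr ++ pairsArr vs ms with hA
      have hLtot : (((A ++ [Sum.inr m, Sum.inl v]).length : Int) - 1) = (A.length : Int) + 1 := by
        simp; push_cast; ring
      have hrange : PySem.List.pyRange (((A ++ [Sum.inr m, Sum.inl v]).length : Int) - 1) (-1) (-2)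
          = ((A.length : Int) + 1) :: PySem.List.pyRange ((A.length : Int) - 1) (-1) (-2) := by
        rw [hLtot, pyRange_m2_cons _ (by have : (0:Int) ≤ (A.length : Int) := Int.natCast_nonneg _; omega)]
        congr 1
        ring_nf
      have hget : PySem.List.pyGet? (A ++ [Sum.inr m, Sum.inl v]) ((A.length : Int) + 1)
          = some (Sum.inl v) := by
        have := PySem.List.pyGet?_append_right A [Sum.inr m, Sum.inl v] 1
        simpa using this
      have hcongr : ∀ (s : String), ∀ i ∈ PySem.List.pyRange ((A.length : Int) - 1) (-1) (-2),
          s ++ pvMemName ((PySem.List.pyGet? (A ++ [Sum.inr m, Sum.inl v]) i).getD (Sum.inl 0))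
            = s ++ pvMemName ((PySem.List.pyGet? A i).getD (Sum.inl 0)) := by
        intro s i hi
        obtain ⟨h0, h1⟩ := mem_pyRange_m2 _ i hi
        have hlt : i.toNat < A.length := by omega
        rw [PySem.List.pyGet?_of_nonneg _ h0, PySem.List.pyGet?_of_nonneg _ h0,
          List.getElem?_append_left hlt]
      rw [hsplit]
      show (List.foldl _ "" _).toList = _
      rw [hrange]
      rw [List.foldl_cons]
      rw [PySem.List.foldl_congr_mem _ _ _ _ hcongr]
      rw [foldl_str_toList]
      have hloop1A : (loop1 A).toList
          = ((PySem.List.pyRange ((A.length : Int) - 1) (-1) (-2)).map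
              (fun i => (pvMemName ((PySem.List.pyGet? A i).getD (Sum.inl 0))).toList)).flatten := by
        unfold loop1
        rw [foldl_str_toList]
        rfl
      rw [ih ms arr hlen'] at hloop1A
      simp only [hget, String.toList_append, Option.getD_some, pvMemName] at *
      rw [List.map_cons, List.flatten_cons, List.append_assoc, ← hloop1A]
      simp


lemma pairsArr_length : ∀ (vs : List Int) (ms : List String), vs.length = ms.length →
    (pairsArr vs ms).length = 2 * vs.length := by
  intro vs
  induction vs with
  | nil => intro ms _; cases ms <;> simp [pairsArr]
  | cons v vs ih =>
    intro ms hlen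
    cases ms with
    | nil => simp at hlen
    | cons m ms =>
      have := ih ms (by simpa using hlen)
      simp [pairsArr, this]
      omega

lemma loop2_pairs : ∀ (vs : List Int) (ms : List String) (arr : List (Int ⊕ String)) (init : String),
    vs.length = ms.length → arr.length % 2 = 1 →
    (loop2 (arr ++ pairsArr vs ms) init).toList
      = (loop2 arr init).toList ++ (ms.reverse.map String.toList).flatten := by
  intro vs
  induction vs with
  | nil =>
    intro ms arr init hlen _
    cases ms with
    | nil => simp [pairsArr]
    | cons m ms => simp at hlen
  | cons v vs ih =>
    intro ms arr init hlen hodd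
    cases ms with
    | nil => simp at hlen
    | cons m ms =>
      have hlen' : vs.length = ms.length := by simpa using hlen
      have hsplit : arr ++ pairsArr (v :: vs) (m :: ms)
          = (arr ++ pairsArr vs ms) ++ [Sum.inr m, Sum.inl v] := by
        simp [pairsArr]
      set A := arr ++ pairsArr vs ms with hA
      have hAlen : A.length = arr.length + 2 * vs.length := by
        rw [hA, List.length_append, pairsArr_length vs ms hlen']
      have hAodd : ((A.length : Int)) % 2 = 1 := by omega
      have hTlen : ((A ++ [Sum.inr m, Sum.inl v]).length : Int) = (A.length : Int) + 2 := by
        simp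
      have hrange : PySem.List.pyRange 1 ((A ++ [Sum.inr m, Sum.inl v]).length : Int) 2
          = PySem.List.pyRange 1 (A.length : Int) 2 ++ [(A.length : Int)] := by
        rw [hTlen, pyRange_2_snoc _ (by omega) hAodd]
      have hget : PySem.List.pyGet? (A ++ [Sum.inr m, Sum.inl v]) ((A.length : Int))
          = some (Sum.inr m) := by
        have := PySem.List.pyGet?_append_right A [Sum.inr m, Sum.inl v] 0
        simpa using this
      have hcongr : ∀ (s : String), ∀ i ∈ PySem.List.pyRange 1 (A.length : Int) 2,
          s ++ pvMemStr ((PySem.List.pyGet? (A ++ [Sum.inr m, Sum.inl v]) i).getD (Sum.inl 0))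
            = s ++ pvMemStr ((PySem.List.pyGet? A i).getD (Sum.inl 0)) := by
        intro s i hi
        obtain ⟨h1, h2, -⟩ := (PySem.List.mem_pyRange_iff_of_pos (by norm_num) i).mp hi
        have h0 : (0 : Int) ≤ i := by omega
        have hlt : i.toNat < A.length := by omega
        rw [PySem.List.pyGet?_of_nonneg _ h0, PySem.List.pyGet?_of_nonneg _ h0,
          List.getElem?_append_left hlt]
      rw [hsplit]
      show (List.foldl _ init _).toList = _
      rw [hrange, List.foldl_append]
      rw [PySem.List.foldl_congr_mem _ _ _ _ hcongr]
      simp only [List.foldl_cons, List.foldl_nil, hget, Option.getD_some,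
        show pvMemStr (Sum.inr m) = m from rfl]
      have hA2 : (List.foldl (fun s i =>
          s ++ pvMemStr ((PySem.List.pyGet? A i).getD (Sum.inl 0))) init
            (PySem.List.pyRange 1 (A.length : Int) 2)).toList
          = (loop2 arr init).toList ++ (ms.reverse.map String.toList).flatten :=
        ih ms arr init hlen' hodd
      rw [String.toList_append, hA2]
      simp


lemma baseArr_len_odd (f : Int) : (baseArr f).length % 2 = 1 := by
  unfold baseArr; split <;> simp

lemma loop2_base (f : Int) (init : String) :
    (loop2 (baseArr f) init).toList
      = init.toList ++ (if f = 1 then "나".toList else []) := by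
  unfold loop2 baseArr
  by_cases hf : f = 1
  · simp only [if_pos hf]
    have hr : PySem.List.pyRange 1 (([Sum.inl 2, Sum.inr "나", Sum.inl (2:Int)].length : Int)) 2
        = [1] := by decide
    rw [hr]
    simp only [List.foldl_cons, List.foldl_nil]
    have hg : (PySem.List.pyGet? [Sum.inl 2, Sum.inr "나", Sum.inl (2:Int)] 1).getD (Sum.inl 0)
        = Sum.inr "나" := by decide
    rw [hg]
    simp [pvMemStr, String.toList_append]
  · simp only [if_neg hf]
    have hr : PySem.List.pyRange 1 (([Sum.inl f] : List (Int ⊕ String)).length : Int) 2 = [] := by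
      norm_num
      decide
    rw [hr]
    simp
lemma loop1_base (f : Int) :
    (loop1 (baseArr f)).toList
      = (if f = 1 then (PySem.List.pyGetD pvName 2 "").toList ++ (PySem.List.pyGetD pvName 2 "").toList
         else (PySem.List.pyGetD pvName f "").toList) := by
  unfold loop1 baseArr
  by_cases hf : f = 1
  · simp only [if_pos hf]
    have hr : PySem.List.pyRange (([Sum.inl 2, Sum.inr "나", Sum.inl (2:Int)].length : Int) - 1) (-1) (-2)
        = [2, 0] := by decide
    rw [hr]
    simp only [List.foldl_cons, List.foldl_nil]
    have hg2 : (PySem.List.pyGet? [Sum.inl 2, Sum.inr "나", Sum.inl (2:Int)] 2).getD (Sum.inl 0)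
        = Sum.inl 2 := by decide
    have hg0 : (PySem.List.pyGet? [Sum.inl 2, Sum.inr "나", Sum.inl (2:Int)] 0).getD (Sum.inl 0)
        = Sum.inl 2 := by decide
    rw [hg2, hg0]
    simp [pvMemName, String.toList_append]
  · simp only [if_neg hf]
    have hr : PySem.List.pyRange ((([Sum.inl f] : List (Int ⊕ String)).length : Int) - 1) (-1) (-2)
        = [0] := by norm_num; decide
    rw [hr]
    simp only [List.foldl_cons, List.foldl_nil, PySem.List.pyGet?_zero_cons, Option.getD_some]
    simp [pvMemName]

-- ===== VERDICT (by name: the statement is the Claim_ definition above) =====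
theorem each_spec : Claim_equal_each := by
  unfold Claim_equal_each Spec_each
  intro n _ _
  obtain ⟨vs, ms, f, hpeel, hlen, hdec⟩ := peel_spec n.toNat n (le_refl _)
  apply String.ext
  -- A side
  rw [each_eq_loops n, hdec]
  rw [String.toList_append]
  rw [loop2_pairs vs ms (baseArr f) _ hlen (baseArr_len_odd f)]
  rw [loop2_base]
  rw [loop1_pairs vs ms (baseArr f) hlen, loop1_base]
  -- B side
  unfold each_alt
  rw [hpeel [] []]
  simp only [List.nil_append]
  by_cases hf : f = 1
  · simp only [hf, reduceIte]
    rw [String.toList_append, String.toList_append, join_empty_toList, join_empty_toList]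
    simp [List.map_append, List.flatten_append, List.append_assoc, Function.comp_def]
  · simp only [if_neg hf]
    rw [String.toList_append, String.toList_append, join_empty_toList, join_empty_toList]
    simp [List.map_append, List.flatten_append, List.append_assoc, Function.comp_def]
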